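-- pv_equiv track=rewrite | github.com/iamprakhargupta/Coding-Questions | arr1.py | solution
-- ===== SOURCE A (Python) =====
-- def solution(A):
--     counter = {}
--     count = 0
--     for i in A:
--         if i in counter:
--             counter[i] += 1
--         else:
--             counter[i] = 1
--     rect = {}
--     for k, v in counter.items():
--         if v > 1:
--             rect[k] = v
--             count += 1
--
--     if count < 2:
--         if list(rect.values()) < [4]:
--             return -1
--
--     x = list(rect.keys())
--     x.sort()
--     if len(x) < 2:
--         return 0
--     length = x[-1]
--     breath = x[-2]
--
--     if rect[length] > 3:
--         return 0
--     else:
--         return abs(length - breath)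
-- ===== SOURCE B (Python) =====
-- def solution(A):
--     counts = {}
--     for i in A:
--         counts[i] = counts.get(i, 0) + 1
--     dups = [k for k, v in counts.items() if v > 1]
--     if len(dups) == 0:
--         return -1
--     if len(dups) == 1:
--         return -1 if counts[dups[0]] < 4 else 0
--     m1 = max(dups)
--     m2 = max([k for k in dups if k != m1])
--     return 0 if counts[m1] > 3 else m1 - m2
-- ===== Notes on version B (the rewrite author's own statement) =====
-- stated objective: alternative
-- what changed: Replaces A's second dict (rect), its running count and the sort of its keys with a filtered key list and two linear max passes over the duplicate keys; no second dict and no sort are built.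
import Mathlib
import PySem

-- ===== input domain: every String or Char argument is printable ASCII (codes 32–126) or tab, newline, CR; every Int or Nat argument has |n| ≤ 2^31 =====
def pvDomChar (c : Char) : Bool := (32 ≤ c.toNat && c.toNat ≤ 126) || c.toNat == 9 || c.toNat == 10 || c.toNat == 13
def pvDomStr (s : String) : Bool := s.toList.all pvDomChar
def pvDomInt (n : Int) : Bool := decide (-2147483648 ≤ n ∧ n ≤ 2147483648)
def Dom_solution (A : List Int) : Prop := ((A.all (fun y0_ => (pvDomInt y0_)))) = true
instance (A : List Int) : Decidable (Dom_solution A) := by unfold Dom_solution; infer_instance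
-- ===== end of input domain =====

-- B replaces A's second dict and the sort of its keys by a filtered key list and two linear max passes.

-- ===== PORT A =====
-- Python's lexicographic list-< on two Int lists, as A compares list(rect.values()) < [4]
def pyListLtInt : List Int → List Int → Bool
  | _, [] => false
  | [], _ :: _ => true
  | a :: as, b :: bs => if a < b then true else if b < a then false else pyListLtInt as bs

def solution (A : List Int) : Int :=
  let counter := A.foldl (fun d i => if d.contains i then d.insert i (d.getD i 0 + 1) else d.insert i 1) PySem.Dict.empty
  let rc := counter.items.foldl
      (fun (p : PySem.Dict Int Int × Int) kv => if kv.2 > 1 then (p.1.insert kv.1 kv.2, p.2 + 1) else p)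
      (PySem.Dict.empty, (0 : Int))
  let rect := rc.1
  let count := rc.2
  if count < 2 ∧ pyListLtInt rect.values [4] then -1
  else
    let x := PySem.List.sorted rect.keys (fun k => k) false
    if x.length < 2 then 0
    else
      let length := (PySem.List.pyGet? x (-1)).getD 0
      let breath := (PySem.List.pyGet? x (-2)).getD 0
      if rect.getD length 0 > 3 then 0 else |length - breath|

-- ===== PORT B =====
def solution_alt (A : List Int) : Int :=
  let counts := A.foldl (fun d i => d.insert i (d.getD i 0 + 1)) (PySem.Dict.empty : PySem.Dict Int Int)
  let dups := (counts.items.filter (fun kv => decide (kv.2 > 1))).map Prod.fst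
  if dups.length = 0 then -1
  else if dups.length = 1 then
    (if counts.getD (PySem.List.pyGetD dups 0 0) 0 < 4 then -1 else 0)
  else
    let m1 := (PySem.List.max? dups (fun k => k)).getD 0
    let m2 := (PySem.List.max? (dups.filter (fun k => decide (k ≠ m1))) (fun k => k)).getD 0
    if counts.getD m1 0 > 3 then 0 else m1 - m2

-- ===== PRECONDITION & SPEC =====
def Spec_solution (A : List Int) (out : Int) : Prop := out = solution_alt A
instance (A : List Int) (out : Int) : Decidable (Spec_solution A out) := by unfold Spec_solution; infer_instance

-- ===== CLAIM (what is proved, stated in full; the proofs are below) =====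
def Claim_equal_solution : Prop := ∀ (A : List Int), Dom_solution A → Spec_solution A (solution A)

-- ===== LEMMAS AND PROOFS =====

-- A's counting loop (membership test then += / =1) is Counter(A)
theorem counter_eq (A : List Int) :
    A.foldl (fun d i => if d.contains i then d.insert i (d.getD i 0 + 1) else d.insert i 1) PySem.Dict.empty
      = PySem.Dict.counter A := by
  have hstep : (fun (d : PySem.Dict Int Int) (i : Int) =>
      if d.contains i then d.insert i (d.getD i 0 + 1) else d.insert i 1)
      = fun d i => d.insert i (d.getD i 0 + 1) := by
    funext d i
    by_cases h : d.contains i = true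
    · simp [h]
    · have h' : d.contains i = false := by simpa using h
      simp [h', PySem.Dict.getD_of_not_contains d (0 : Int) h']
  rw [hstep, PySem.Dict.foldl_insert_getD_add_one_eq_counter]

-- A's rect/count loop = fold of the filtered items plus their number
theorem rc_eq (L : List (Int × Int)) (d : PySem.Dict Int Int) (c : Int) :
    L.foldl (fun (p : PySem.Dict Int Int × Int) kv => if kv.2 > 1 then (p.1.insert kv.1 kv.2, p.2 + 1) else p) (d, c)
      = ((L.filter (fun kv => decide (kv.2 > 1))).foldl (fun e kv => e.insert kv.1 kv.2) d,
         c + ((L.filter (fun kv => decide (kv.2 > 1))).length : Int)) := by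
  induction L generalizing d c with
  | nil => simp
  | cons kv t ih =>
    by_cases h : (1 : Int) < kv.2
    · have hf : (kv :: t).filter (fun kv => decide (kv.2 > 1)) = kv :: t.filter (fun kv => decide (kv.2 > 1)) := by
        simp [h]
      rw [List.foldl_cons, if_pos h, ih, hf, List.foldl_cons, List.length_cons]
      exact Prod.ext_iff.mpr ⟨rfl, by push_cast; ring⟩
    · have hf : (kv :: t).filter (fun kv => decide (kv.2 > 1)) = t.filter (fun kv => decide (kv.2 > 1)) := by
        simp [h]
      rw [List.foldl_cons, if_neg h, ih, hf]

-- max? with the identity key picks the unique upper bound that is a member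
theorem max?_id_eq (K : List Int) (m : Int) (hm : m ∈ K) (hmax : ∀ y ∈ K, y ≤ m) :
    PySem.List.max? K (fun k => k) = some m := by
  cases h : PySem.List.max? K (fun k => k) with
  | none =>
    rw [PySem.List.max?_eq_none_iff] at h
    subst h; cases hm
  | some m' =>
    have h1 : ∀ y ∈ K, y ≤ m' := by simpa using PySem.List.max?_isMax h
    exact congrArg some (le_antisymm (hmax m' (PySem.List.max?_mem h)) (h1 m hm))

-- the two largest elements of a nodup list, via its sort
theorem top_facts (K s : List Int) (hs : s = PySem.List.sorted K (fun k => k) false)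
    (hnd : K.Nodup) (h2 : 2 ≤ K.length) :
    PySem.List.max? K (fun k => k) = PySem.List.pyGet? s (-1) ∧
    PySem.List.max? (K.filter (fun k => decide (k ≠ (PySem.List.pyGet? s (-1)).getD 0))) (fun k => k)
      = PySem.List.pyGet? s (-2) ∧
    (PySem.List.pyGet? s (-2)).getD 0 < (PySem.List.pyGet? s (-1)).getD 0 := by
  subst hs
  set s := PySem.List.sorted K (fun k => k) false with hsdef
  have hperm : s.Perm K := PySem.List.sorted_perm K (fun k => k) false
  have hslen : s.length = K.length := PySem.List.length_sorted K (fun k => k) false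
  have h2s : 2 ≤ s.length := by omega
  have h1lt : s.length - 1 < s.length := by omega
  have h2lt : s.length - 2 < s.length := by omega
  have e1 : PySem.List.pyGet? s (-1) = some s[s.length - 1] := by
    rw [PySem.List.pyGet?_neg_ofNat s 1 (by norm_num) (by omega)]
    exact List.getElem?_eq_getElem h1lt
  have e2 : PySem.List.pyGet? s (-2) = some s[s.length - 2] := by
    rw [PySem.List.pyGet?_neg_ofNat s 2 (by norm_num) (by omega)]
    exact List.getElem?_eq_getElem h2lt
  have hmono : ∀ y ∈ s, y ≤ s[s.length - 1] := by
    intro y hy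
    obtain ⟨i, hi, rfl⟩ := List.mem_iff_getElem.mp hy
    exact PySem.List.sorted_id_getElem_mono K (by omega) (by omega)
  have hm1 : PySem.List.max? K (fun k => k) = some s[s.length - 1] := by
    apply max?_id_eq
    · exact hperm.subset (List.getElem_mem h1lt)
    · intro y hy
      exact hmono y ((hperm.mem_iff).mpr hy)
  have hnds : s.Nodup := (hperm.nodup_iff).mpr hnd
  have hne : s ≠ [] := by intro h; rw [h] at h2s; simp at h2s
  have hxsplit : s.dropLast ++ [s[s.length - 1]] = s := by
    have h := List.dropLast_append_getLast hne
    rwa [List.getLast_eq_getElem] at h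
  have hdll : s.dropLast.length = s.length - 1 := by simp
  -- filtering out the max leaves exactly dropLast
  have hdisj : ∀ a ∈ s.dropLast, a ≠ s[s.length - 1] := by
    intro a ha heq
    have hnd2 : (s.dropLast ++ [s[s.length - 1]]).Nodup := by rw [hxsplit]; exact hnds
    have hdj := (List.nodup_append.mp hnd2).2.2
    exact hdj a ha (s[s.length - 1]) (by simp) heq
  have hfilter2 : List.filter (fun k => decide (k ≠ s[s.length - 1])) (s.dropLast ++ [s[s.length - 1]]) = s.dropLast := by
    rw [List.filter_append]
    have hsing : (List.filter (fun k => decide (k ≠ s[s.length - 1])) [s[s.length - 1]]) = [] := by simp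
    rw [hsing, List.append_nil]
    exact List.filter_eq_self.mpr (fun a ha => by simpa using hdisj a ha)
  have hfilter : s.filter (fun k => decide (k ≠ s[s.length - 1])) = s.dropLast := by
    rw [← hfilter2]
    exact congrArg (List.filter (fun k => decide (k ≠ s[s.length - 1]))) hxsplit.symm
  have hKperm : (K.filter (fun k => decide (k ≠ s[s.length - 1]))).Perm s.dropLast :=
    hfilter ▸ (hperm.filter (fun k => decide (k ≠ s[s.length - 1]))).symm
  have hdl2 : s.length - 2 < s.dropLast.length := by omega
  have hdlelem : s.dropLast[s.length - 2] = s[s.length - 2] := List.getElem_dropLast hdl2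
  have hm2 : PySem.List.max? (K.filter (fun k => decide (k ≠ s[s.length - 1]))) (fun k => k)
      = some s[s.length - 2] := by
    apply max?_id_eq
    · exact (hKperm.mem_iff).mpr (by rw [← hdlelem]; exact List.getElem_mem hdl2)
    · intro y hy
      have hy' : y ∈ s.dropLast := (hKperm.mem_iff).mp hy
      obtain ⟨i, hi, rfl⟩ := List.mem_iff_getElem.mp hy'
      rw [List.getElem_dropLast hi]
      exact PySem.List.sorted_id_getElem_mono K (by omega) (by omega)
  have hlt : s[s.length - 2] < s[s.length - 1] := by
    have hle : s[s.length - 2] ≤ s[s.length - 1] :=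
      PySem.List.sorted_id_getElem_mono K (by omega) (by omega)
    rcases lt_or_eq_of_le hle with h | h
    · exact h
    · exfalso
      have := List.Nodup.getElem_inj_iff hnds (i := s.length - 2) (j := s.length - 1)
        (hi := h2lt) (hj := h1lt)
      omega
  refine ⟨by rw [hm1, e1], ?_, by rw [e1, e2]; simpa using hlt⟩
  rw [e1]
  simpa [e2] using hm2

-- the two programs, both phrased over the duplicate-key list K
theorem core (K : List Int) (cnt : Int → Int) (rect : PySem.Dict Int Int)
    (hnd : K.Nodup) (hitems : rect.items = K.map (fun k => (k, cnt k))) :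
    (if (K.length : Int) < 2 ∧ pyListLtInt rect.values [4] = true then (-1 : Int)
     else if (PySem.List.sorted rect.keys (fun k => k) false).length < 2 then 0
     else if rect.getD ((PySem.List.pyGet? (PySem.List.sorted rect.keys (fun k => k) false) (-1)).getD 0) 0 > 3 then 0
     else |(PySem.List.pyGet? (PySem.List.sorted rect.keys (fun k => k) false) (-1)).getD 0
            - (PySem.List.pyGet? (PySem.List.sorted rect.keys (fun k => k) false) (-2)).getD 0|)
    = (if K.length = 0 then -1
       else if K.length = 1 then (if cnt (PySem.List.pyGetD K 0 0) < 4 then -1 else 0)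
       else if cnt ((PySem.List.max? K (fun k => k)).getD 0) > 3 then 0
       else (PySem.List.max? K (fun k => k)).getD 0
            - (PySem.List.max? (K.filter (fun k => decide (k ≠ (PySem.List.max? K (fun k => k)).getD 0))) (fun k => k)).getD 0) := by
  have hkeys : rect.keys = K := by
    simp [PySem.Dict.keys, hitems, List.map_map, Function.comp_def]
  have hvals : rect.values = K.map cnt := by
    simp [PySem.Dict.values, hitems, List.map_map, Function.comp_def]
  have hget : ∀ k ∈ K, rect.getD k 0 = cnt k := by
    intro k hk
    exact PySem.Dict.getD_of_mem_items rect
      (by rw [hitems]; exact List.mem_map_of_mem hk) (by rw [hkeys]; exact hnd) 0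
  match K, hnd with
  | [], _ =>
    rw [hvals]
    norm_num [pyListLtInt]
  | [k], hnd =>
    rw [hvals]
    have hval : pyListLtInt (List.map cnt [k]) [4] = decide (cnt k < 4) := by
      simp only [List.map_cons, List.map_nil, pyListLtInt]
      by_cases h : cnt k < 4 <;> simp [h]
    have hidx : PySem.List.pyGetD [k] 0 0 = k := by simp [PySem.List.pyGetD_ofNat']
    by_cases h4 : cnt k < 4
    · rw [if_pos ⟨by norm_num, by rw [hval]; simp [h4]⟩]
      simp [hidx, h4]
    · rw [if_neg (by rintro ⟨-, hlt⟩; rw [hval] at hlt; simp [h4] at hlt)]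
      rw [if_pos (by rw [PySem.List.length_sorted, hkeys]; norm_num)]
      simp [hidx, h4]
  | k1 :: k2 :: t, hnd =>
    have h2 : 2 ≤ (k1 :: k2 :: t).length := by simp
    rw [hkeys, hvals]
    set K := k1 :: k2 :: t with hKdef
    obtain ⟨f1, f2, f3⟩ := top_facts K _ rfl hnd h2
    rw [← f1] at f2 f3
    have hg1 : ¬ ((K.length : Int) < 2 ∧ pyListLtInt (List.map cnt K) [4] = true) := by
      rintro ⟨hc, -⟩
      rw [hKdef] at hc
      simp only [List.length_cons] at hc
      omega
    rw [if_neg hg1]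
    have hg2 : ¬ ((PySem.List.sorted K (fun k => k) false).length < 2) := by
      rw [PySem.List.length_sorted, hKdef]
      simp
    rw [if_neg hg2]
    have hK0 : ¬ (K.length = 0) := by rw [hKdef]; simp
    have hK1 : ¬ (K.length = 1) := by rw [hKdef]; simp
    rw [if_neg hK0, if_neg hK1]
    rw [← f1, ← f2]
    rw [← f2] at f3
    have hm1mem : (PySem.List.max? K (fun k => k)).getD 0 ∈ K := by
      cases h : PySem.List.max? K (fun k => k) with
      | none => rw [PySem.List.max?_eq_none_iff] at h; simp [hKdef] at h
      | some m => simpa using PySem.List.max?_mem h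
    rw [hget _ hm1mem]
    by_cases h3 : cnt ((PySem.List.max? K (fun k => k)).getD 0) > 3
    · rw [if_pos h3, if_pos h3]
    · rw [if_neg h3, if_neg h3]
      exact abs_of_nonneg (by omega)

theorem main_eq (A : List Int) : solution A = solution_alt A := by
  have hc := counter_eq A
  simp only [solution, solution_alt, hc, PySem.Dict.foldl_insert_getD_add_one_eq_counter,
    rc_eq, PySem.Dict.items_counter, List.filter_map, List.map_map, PySem.Dict.getD_counter,
    Function.comp_def, List.length_map, List.map_id', zero_add]
  refine core _ (fun k => ((List.count k A : Int))) _
    (List.Nodup.filter _ (PySem.Set.nodup_ofList A)) ?_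
  refine Eq.trans (PySem.Dict.items_foldl_insert_fresh _ Prod.fst Prod.snd PySem.Dict.empty
    (fun a _ => PySem.Dict.contains_empty a.1) ?_) ?_
  · have hid : ∀ (L : List Int),
        (List.map Prod.fst (L.map (fun k => (k, (List.count k A : Int))))) = L := by
      intro L; simp [List.map_map, Function.comp_def]
    rw [hid]
    exact List.Nodup.filter _ (PySem.Set.nodup_ofList A)
  · simp [Function.comp_def, PySem.Dict.empty]

-- ===== VERDICT (by name: the statement is the Claim_ definition above) =====
theorem solution_spec : Claim_equal_solution := by
  intro A _
  unfold Spec_solution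
  exact main_eq A
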